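-- pv_equiv track=rewrite | github.com/revertilo/AI_API | analyze_revert.py | fill_missing_pc
-- ===== SOURCE A (Python) =====
-- def fill_missing_pc(source_map):
--     """Заполняет пропущенные значения предыдущим code и context_code"""
--     if not source_map:
--         return source_map
--
--     # Получаем все pc и сортируем их
--     pcs = sorted(source_map.keys())
--     if not pcs:
--         return source_map
--
--     # Заполняем пропуски
--     result = {}
--     last_code = source_map[pcs[0]].get('code', '')
--     last_context = source_map[pcs[0]].get('context_code', '')
--
--     for i in range(pcs[0], pcs[-1] + 1):
--         if i in source_map:
--             last_code = source_map[i].get('code', '')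
--             last_context = source_map[i].get('context_code', '')
--         result[i] = {
--             'code': last_code,
--             'context_code': last_context
--         }
--
--     return result
-- ===== SOURCE B (Python) =====
-- def fill_missing_pc(source_map):
--     """Заполняет пропущенные значения предыдущим code и context_code"""
--     if not source_map:
--         return source_map
--
--     # Sorted present pcs; each key fills its own gap segment [pc, next_pc)
--     keys = sorted(source_map)
--     ends = keys[1:] + [keys[-1] + 1]
--
--     result = {}
--     for pc, end in zip(keys, ends):
--         entry = source_map[pc]
--         code = entry.get('code', '')
--         context = entry.get('context_code', '')
--         for i in range(pc, end):
--             result[i] = {'code': code, 'context_code': context}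
--     return result
-- ===== Notes on version B (the rewrite author's own statement) =====
-- stated objective: alternative
-- what changed: Replaces A's flat scan over every integer in [min_pc, max_pc] with a membership test and forward-carried state by an outer loop over the sorted present keys that expands each key into its gap segment [pc, next_pc) directly, so no per-integer membership test or carried last_code/last_context state is needed.
import Mathlib
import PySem

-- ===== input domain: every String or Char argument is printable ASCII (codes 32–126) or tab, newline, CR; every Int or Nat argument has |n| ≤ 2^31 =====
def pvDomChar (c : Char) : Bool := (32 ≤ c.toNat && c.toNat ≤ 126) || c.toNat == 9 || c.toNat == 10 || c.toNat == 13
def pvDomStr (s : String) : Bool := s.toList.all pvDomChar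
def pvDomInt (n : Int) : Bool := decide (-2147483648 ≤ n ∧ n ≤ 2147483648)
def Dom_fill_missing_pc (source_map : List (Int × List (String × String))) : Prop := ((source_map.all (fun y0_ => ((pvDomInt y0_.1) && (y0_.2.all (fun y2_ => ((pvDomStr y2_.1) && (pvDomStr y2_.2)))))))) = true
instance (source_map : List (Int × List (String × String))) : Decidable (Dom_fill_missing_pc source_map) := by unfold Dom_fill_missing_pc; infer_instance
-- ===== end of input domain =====

-- B replaces A's flat per-integer scan of [min_pc, max_pc] (membership test + carried
-- last_code/last_context state) by an outer loop over the sorted present keys, each key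
-- expanded into its gap segment [pc, next_pc); objective: alternative decomposition.

-- shared expression helper: entry.get('code',''), entry.get('context_code','') on the value at key k
-- (inner dicts built from the association list exactly as Python's dict construction)
def pvVal (d : PySem.Dict Int (List (String × String))) (k : Int) : String × String :=
  ((PySem.Dict.ofList (d.getD k [])).getD "code" "", (PySem.Dict.ofList (d.getD k [])).getD "context_code" "")

-- A's loop body: st.1 = (last_code, last_context), st.2 = result; one iteration of A's for-loop
def pvA (d : PySem.Dict Int (List (String × String))) :
    ((String × String) × PySem.Dict Int (List (String × String))) → Int →
    ((String × String) × PySem.Dict Int (List (String × String))) :=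
  fun st i =>
    let cur := if d.contains i then pvVal d i else st.1
    (cur, st.2.insert i [("code", cur.1), ("context_code", cur.2)])

-- B's loop body: one (pc, end) pair fills result on range(pc, end) with pc's code/context
def pvB (d : PySem.Dict Int (List (String × String))) :
    PySem.Dict Int (List (String × String)) → (Int × Int) →
    PySem.Dict Int (List (String × String)) :=
  fun r p =>
    let v := pvVal d p.1
    (PySem.List.pyRange p.1 p.2).foldl
      (fun r i => r.insert i [("code", v.1), ("context_code", v.2)]) r

-- ===== PORT A =====
def fill_missing_pc (source_map : List (Int × List (String × String))) : List (Int × List (String × String)) :=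
  if source_map = [] then source_map
  else
    let d := PySem.Dict.ofList source_map
    let pcs := PySem.List.sorted d.keys (fun x => x)
    match pcs with
    | [] => source_map        -- 'if not pcs: return source_map'
    | p0 :: rest =>
      -- state seeded from source_map[pcs[0]] (pcs[0] is a key, so the lookup succeeds);
      -- pcs[-1] on a nonempty list is getLastD
      ((PySem.List.pyRange p0 ((p0 :: rest).getLastD 0 + 1)).foldl (pvA d)
        (pvVal d p0, PySem.Dict.empty)).2.items

-- ===== PORT B =====
def fill_missing_pc_alt (source_map : List (Int × List (String × String))) : List (Int × List (String × String)) :=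
  if source_map = [] then source_map
  else
    let d := PySem.Dict.ofList source_map
    let keys := PySem.List.sorted d.keys (fun x => x)
    -- ends = keys[1:] + [keys[-1] + 1]; keys is nonempty here, so keys[-1] is getLastD
    ((keys.zip (keys.drop 1 ++ [keys.getLastD 0 + 1])).foldl (pvB d) PySem.Dict.empty).items

-- ===== PRECONDITION & SPEC =====
def Spec_fill_missing_pc (source_map : List (Int × List (String × String))) (out : List (Int × List (String × String))) : Prop := out = fill_missing_pc_alt source_map
instance (source_map : List (Int × List (String × String))) (out : List (Int × List (String × String))) : Decidable (Spec_fill_missing_pc source_map out) := by unfold Spec_fill_missing_pc; infer_instance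

-- ===== CLAIM (what is proved, stated in full; the proofs are below) =====
def Claim_equal_fill_missing_pc : Prop := ∀ (source_map : List (Int × List (String × String))), Dom_fill_missing_pc source_map → Spec_fill_missing_pc source_map (fill_missing_pc source_map)

-- ===== LEMMAS AND PROOFS =====

-- A's fold over a block of absent pcs just re-inserts the carried state
lemma pv_seg_nokeys (d : PySem.Dict Int (List (String × String))) :
    ∀ (l : List Int), (∀ i ∈ l, d.contains i = false) →
    ∀ (v : String × String) (r : PySem.Dict Int (List (String × String))),
    l.foldl (pvA d) (v, r)
      = (v, l.foldl (fun r i => r.insert i [("code", v.1), ("context_code", v.2)]) r) := by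
  intro l
  induction l with
  | nil => intro _ v r; rfl
  | cons x t ih =>
    intro h v r
    have hx : d.contains x = false := h x List.mem_cons_self
    simp only [List.foldl_cons, pvA, hx, Bool.false_eq_true, if_false]
    exact ih (fun i hi => h i (List.mem_cons_of_mem _ hi)) v (r.insert x [("code", v.1), ("context_code", v.2)])

-- A's fold over one segment [k, m) with k present and (k, m) free of keys
lemma pv_seg_one (d : PySem.Dict Int (List (String × String))) (k m : Int)
    (hkm : k < m) (hk : d.contains k = true)
    (hgap : ∀ i, k < i → i < m → d.contains i = false)
    (v : String × String) (r : PySem.Dict Int (List (String × String))) :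
    (PySem.List.pyRange k m).foldl (pvA d) (v, r)
      = (pvVal d k,
         (PySem.List.pyRange k m).foldl
           (fun r i => r.insert i [("code", (pvVal d k).1), ("context_code", (pvVal d k).2)]) r) := by
  have hfree : ∀ i ∈ PySem.List.pyRange (k + 1) m, d.contains i = false := by
    intro i hi
    rw [PySem.List.mem_pyRange_one] at hi
    exact hgap i (by omega) hi.2
  rw [PySem.List.pyRange_one_cons hkm]
  simp only [List.foldl_cons]
  have h1 : pvA d (v, r) k
      = (pvVal d k, r.insert k [("code", (pvVal d k).1), ("context_code", (pvVal d k).2)]) := by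
    simp [pvA, hk]
  rw [h1, pv_seg_nokeys d _ hfree]

lemma pv_last_ge : ∀ (ks : List Int) (k : Int),
    List.Pairwise (· < ·) (k :: ks) → k ≤ (k :: ks).getLastD 0 := by
  intro ks
  induction ks with
  | nil => intro k _; simp
  | cons k1 t ih =>
    intro k hp
    have h1 : k < k1 := (List.pairwise_cons.1 hp).1 k1 List.mem_cons_self
    have h2 := ih k1 (List.pairwise_cons.1 hp).2
    simp only [List.getLastD_cons] at h2 ⊢
    omega

-- main correspondence: A's flat fold over the whole range equals B's segment fills
lemma pv_main (d : PySem.Dict Int (List (String × String))) :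
    ∀ (ks : List Int) (k : Int),
    List.Pairwise (· < ·) (k :: ks) →
    (∀ x ∈ (k :: ks), d.contains x = true) →
    (∀ i, k < i → d.contains i = true → i ∈ ks) →
    ∀ (v : String × String) (r : PySem.Dict Int (List (String × String))),
    (PySem.List.pyRange k ((k :: ks).getLastD 0 + 1)).foldl (pvA d) (v, r)
      = (pvVal d ((k :: ks).getLastD 0),
         ((k :: ks).zip (ks ++ [(k :: ks).getLastD 0 + 1])).foldl (pvB d) r) := by
  intro ks
  induction ks with
  | nil =>
    intro k _ hmem _ v r
    have hk : d.contains k = true := hmem k List.mem_cons_self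
    have hl : ([k] : List Int).getLastD 0 = k := rfl
    rw [hl]
    rw [PySem.List.pyRange_one_singleton]
    simp [pvA, pvB, hk, PySem.List.pyRange_one_singleton]
  | cons k1 t ih =>
    intro k hp hmem hno v r
    have h1 : k < k1 := (List.pairwise_cons.1 hp).1 k1 List.mem_cons_self
    have hptail : List.Pairwise (· < ·) (k1 :: t) := (List.pairwise_cons.1 hp).2
    have hL : k1 ≤ (k1 :: t).getLastD 0 := pv_last_ge t k1 hptail
    have hlast : ((k : Int) :: k1 :: t).getLastD 0 = (k1 :: t).getLastD 0 := by
      simp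
    rw [hlast]
    rw [PySem.List.pyRange_one_append k k1 ((k1 :: t).getLastD 0 + 1) (by omega) (by omega)]
    rw [List.foldl_append]
    have hgap : ∀ i, k < i → i < k1 → d.contains i = false := by
      intro i hki hik1
      cases hc : d.contains i with
      | false => rfl
      | true =>
        exfalso
        rcases List.mem_cons.1 (hno i hki hc) with h' | h'
        · omega
        · have : k1 < i := (List.pairwise_cons.1 hptail).1 i h'
          omega
    rw [pv_seg_one d k k1 h1 (hmem k List.mem_cons_self) hgap v r]
    rw [ih k1 hptail (fun x hx => hmem x (List.mem_cons_of_mem _ hx)) (by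
      intro i hk1i hci
      rcases List.mem_cons.1 (hno i (by omega) hci) with h' | h'
      · omega
      · exact h')]
    simp only [List.cons_append, List.zip_cons_cons, List.foldl_cons]
    rfl

-- keys of the dict built from source_map are exactly the distinct first components
lemma pv_mem_keys (sm : List (Int × List (String × String))) (x : Int) :
    x ∈ (PySem.Dict.ofList sm).keys ↔ x ∈ sm.map Prod.fst := by
  have h := PySem.Dict.keys_foldl_insert_key sm Prod.fst (fun d p => p.2)
    (PySem.Dict.empty (κ := Int) (ν := List (String × String)))
  show x ∈ (sm.foldl (fun acc p => acc.insert p.1 p.2) PySem.Dict.empty).keys ↔ _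
  rw [h]
  simp

-- ===== VERDICT (by name: the statement is the Claim_ definition above) =====
theorem fill_missing_pc_spec : Claim_equal_fill_missing_pc := by
  intro sm _
  unfold Spec_fill_missing_pc
  by_cases hsm : sm = []
  · simp [fill_missing_pc, fill_missing_pc_alt, hsm]
  · cases hp : PySem.List.sorted (PySem.Dict.ofList sm).keys (fun x => x) with
    | nil =>
      exfalso
      have hkeys : (PySem.Dict.ofList sm).keys = [] := by
        have h2 := hp
        rwa [PySem.List.sorted_eq_nil_iff (PySem.Dict.ofList sm).keys (fun x : Int => x) false] at h2
      obtain ⟨p, t, rfl⟩ := List.exists_cons_of_ne_nil hsm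
      have : p.1 ∈ (PySem.Dict.ofList (p :: t)).keys := (pv_mem_keys _ _).2 (by simp)
      rw [hkeys] at this
      exact absurd this (List.not_mem_nil)
    | cons k rest =>
      have hperm : (k :: rest).Perm (PySem.Dict.ofList sm).keys := by
        rw [← hp]; exact PySem.List.sorted_perm (PySem.Dict.ofList sm).keys (fun x : Int => x) false
      have hnd : (k :: rest).Nodup := hperm.nodup_iff.2 (PySem.Dict.nodup_keys_ofList sm)
      have hle : (k :: rest).Pairwise (· ≤ ·) := by
        have := PySem.List.sorted_pairwise (PySem.Dict.ofList sm).keys (fun x => x)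
        rw [hp] at this
        exact this
      have hlt : (k :: rest).Pairwise (· < ·) :=
        (hle.and hnd).imp (fun h => lt_of_le_of_ne h.1 h.2)
      have hmem : ∀ x ∈ (k :: rest), (PySem.Dict.ofList sm).contains x = true := by
        intro x hx
        exact (PySem.Dict.contains_iff_mem_keys _ _).2 (hperm.subset hx)
      have hno : ∀ i, k < i → (PySem.Dict.ofList sm).contains i = true → i ∈ rest := by
        intro i hki hc
        have hi : i ∈ (k :: rest) := hperm.mem_iff.2 ((PySem.Dict.contains_iff_mem_keys _ _).1 hc)
        rcases List.mem_cons.1 hi with h' | h'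
        · omega
        · exact h'
      simp only [fill_missing_pc, fill_missing_pc_alt, if_neg hsm, hp]
      rw [pv_main (PySem.Dict.ofList sm) rest k hlt hmem hno (pvVal (PySem.Dict.ofList sm) k) PySem.Dict.empty]
      simp
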